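-- pv_equiv track=rewrite | github.com/PepegaSan/Transcript_multi_tool | transcript.py | _format_chunks_for_export
-- ===== SOURCE A (Python) =====
-- def _format_chunks_for_export(chunks):
--     if not chunks:
--         return ""
--     lines = []
--     separator = "-" * 60
--     for idx, chunk in enumerate(chunks, start=1):
--         word_count = len(chunk.split())
--         lines.append(f"[Block {idx} | {word_count} Words]")
--         lines.append(chunk.strip())
--         if idx < len(chunks):
--             lines.append("")
--             lines.append(separator)
--             lines.append("")
--     return "\n".join(lines).strip()
-- ===== SOURCE B (Python) =====
-- def _format_chunks_for_export(chunks):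
--     if not chunks:
--         return ""
--     separator = "\n\n" + "-" * 60 + "\n\n"
--
--     def fmt(lo, hi):
--         # format chunks[lo:hi] (nonempty) with 1-based labels lo+1 .. hi
--         if hi - lo == 1:
--             chunk = chunks[lo]
--             return f"[Block {lo + 1} | {len(chunk.split())} Words]\n{chunk.strip()}"
--         mid = (lo + hi) // 2
--         return fmt(lo, mid) + separator + fmt(mid, hi)
--
--     return fmt(0, len(chunks)).strip()
-- ===== Notes on version B (the rewrite author's own statement) =====
-- stated objective: alternative
-- what changed: Replaces the left-to-right line-accumulator loop with its per-iteration not-last-chunk separator branch by a divide-and-conquer recursion on the index range: each half is formatted recursively and the halves are concatenated with one separator, correct by associativity of the glued concatenation.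
import Mathlib
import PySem

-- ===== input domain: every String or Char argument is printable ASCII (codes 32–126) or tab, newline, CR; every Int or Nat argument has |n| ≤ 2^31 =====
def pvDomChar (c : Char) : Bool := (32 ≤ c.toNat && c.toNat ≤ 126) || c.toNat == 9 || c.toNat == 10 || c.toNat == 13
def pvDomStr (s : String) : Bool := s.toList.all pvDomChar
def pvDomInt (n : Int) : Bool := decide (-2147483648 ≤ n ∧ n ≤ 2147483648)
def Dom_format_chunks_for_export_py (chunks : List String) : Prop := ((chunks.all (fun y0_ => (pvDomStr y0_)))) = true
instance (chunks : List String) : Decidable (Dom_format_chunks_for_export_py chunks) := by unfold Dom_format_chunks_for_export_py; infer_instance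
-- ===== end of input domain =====

-- B replaces A's left-to-right line accumulator (with its per-iteration "not the last chunk"
-- separator branch) by a divide-and-conquer recursion: format each half of the index range and
-- concatenate with one separator, correct because the glue concatenation is associative
-- (objective: alternative decomposition).

-- ===== PORT A =====
def format_chunks_for_export_py (chunks : List String) : String :=
  if chunks = [] then ""
  else
    let separator : String := String.ofList (List.replicate 60 '-')
    let lines : List String := (PySem.List.enumerate chunks 1).foldl (fun lines p =>
      let word_count : Int := ((PySem.Str.split₀ p.2).length : Int)
      let lines := lines ++ ["[Block " ++ PySem.Int.toStr p.1 ++ " | " ++ PySem.Int.toStr word_count ++ " Words]"]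
      let lines := lines ++ [PySem.Str.strip p.2]
      if p.1 < (chunks.length : Int) then lines ++ ["", separator, ""] else lines) []
    PySem.Str.strip (PySem.Str.join "\n" lines)

-- ===== PORT B =====
-- fmt(lo, hi) of Source B: formats chunks[lo:hi]; Python only ever calls it with lo < hi, so the
-- 'hi ≤ lo + 1' fallback and the pyGetD default are unreachable totality guards, not new behaviour.
def pvFmt (chunks : List String) (lo hi : Nat) : String :=
  if hi - lo = 1 then
    let chunk : String := PySem.List.pyGetD chunks (lo : Int) ""
    "[Block " ++ PySem.Int.toStr ((lo : Int) + 1) ++ " | "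
      ++ PySem.Int.toStr ((PySem.Str.split₀ chunk).length : Int) ++ " Words]"
      ++ "\n" ++ PySem.Str.strip chunk
  else if hi ≤ lo + 1 then ""
  else
    let mid : Nat := (lo + hi) / 2
    pvFmt chunks lo mid ++ ("\n\n" ++ String.ofList (List.replicate 60 '-') ++ "\n\n") ++ pvFmt chunks mid hi
termination_by hi - lo
decreasing_by all_goals omega

def format_chunks_for_export_py_alt (chunks : List String) : String :=
  if chunks = [] then ""
  else PySem.Str.strip (pvFmt chunks 0 chunks.length)

-- ===== PRECONDITION & SPEC =====
def Spec_format_chunks_for_export_py (chunks : List String) (out : String) : Prop := out = format_chunks_for_export_py_alt chunks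
instance (chunks : List String) (out : String) : Decidable (Spec_format_chunks_for_export_py chunks out) := by unfold Spec_format_chunks_for_export_py; infer_instance

-- ===== CLAIM =====
def Claim_equal_format_chunks_for_export_py : Prop := ∀ (chunks : List String), Dom_format_chunks_for_export_py chunks → Spec_format_chunks_for_export_py chunks (format_chunks_for_export_py chunks)

-- ===== LEMMAS AND PROOFS =====

-- the block header as a String, and its character list (proof-only helpers)
def pvHdrStr (p : Int × String) : String :=
  "[Block " ++ PySem.Int.toStr p.1 ++ " | " ++ PySem.Int.toStr ((PySem.Str.split₀ p.2).length : Int) ++ " Words]"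

def pvHdr (p : Int × String) : List Char := (pvHdrStr p).toList

def pvSepL : List Char := List.replicate 60 '-'
def pvGlueL : List Char := '\n' :: '\n' :: (pvSepL ++ ['\n', '\n'])

-- the 0-based i-th labeled block, as a character list
def pvBlockAt (chunks : List String) (i : Nat) : List Char :=
  pvHdr ((i : Int) + 1, PySem.List.pyGetD chunks (i : Int) "")
    ++ '\n' :: (PySem.Str.strip (PySem.List.pyGetD chunks (i : Int) "")).toList

-- the loop body of port A written as 'acc ++ pvG n p'
def pvG (n : Nat) (p : Int × String) : List String :=
  [pvHdrStr p, PySem.Str.strip p.2] ++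
    (if p.1 < (n : Int) then ["", String.ofList pvSepL, ""] else [])

lemma pv_peel (a b : List Char) (T : List (List Char)) (hT : T ≠ []) :
    PySem.Chars.join ['\n'] (a :: b :: [] :: pvSepL :: [] :: T)
      = (a ++ '\n' :: b) ++ pvGlueL ++ PySem.Chars.join ['\n'] T := by
  obtain ⟨t, T', rfl⟩ := List.exists_cons_of_ne_nil hT
  simp [PySem.Chars.join_cons_cons, pvGlueL, List.append_assoc]

lemma pv_key (chs : List String) (s n : Nat) (h : s + chs.length = n + 1) (hne : chs ≠ []) :
    PySem.Chars.join ['\n'] ((PySem.List.enumerate chs (s : Int)).flatMap (fun p =>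
        [pvHdr p, (PySem.Str.strip p.2).toList] ++ (if p.1 < (n : Int) then [[], pvSepL, []] else [])))
    = PySem.Chars.join pvGlueL ((PySem.List.enumerate chs (s : Int)).map (fun p =>
        pvHdr p ++ '\n' :: (PySem.Str.strip p.2).toList)) := by
  induction chs generalizing s with
  | nil => exact absurd rfl hne
  | cons c rest ih =>
    cases rest with
    | nil =>
      have hs : s = n := by simpa using h
      subst hs
      simp [PySem.List.enumerate_cons, PySem.Chars.join_cons_cons, PySem.Chars.join_singleton]
    | cons c2 rest2 =>
      have hlt : (s : Int) < (n : Int) := by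
        simp only [List.length_cons] at h; omega
      have ih' := ih (s + 1) (by simp only [List.length_cons] at h ⊢; omega) (by simp)
      simp only [PySem.List.enumerate_cons, List.flatMap_cons, List.map_cons,
        if_pos hlt, List.cons_append, List.nil_append] at ih' ⊢
      push_cast at ih'
      rw [pv_peel _ _ _ (by simp)]
      rw [ih']
      simp [PySem.Chars.join_cons_cons, List.append_assoc]

lemma pv_foldl_eq (chunks : List String) :
    ((PySem.List.enumerate chunks 1).foldl (fun lines p =>
      let word_count : Int := ((PySem.Str.split₀ p.2).length : Int)
      let lines := lines ++ ["[Block " ++ PySem.Int.toStr p.1 ++ " | " ++ PySem.Int.toStr word_count ++ " Words]"]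
      let lines := lines ++ [PySem.Str.strip p.2]
      if p.1 < (chunks.length : Int) then lines ++ ["", String.ofList pvSepL, ""] else lines) [])
    = (PySem.List.enumerate chunks 1).flatMap (pvG chunks.length) := by
  have hf : (fun (lines : List String) (p : Int × String) =>
      let word_count : Int := ((PySem.Str.split₀ p.2).length : Int)
      let lines := lines ++ ["[Block " ++ PySem.Int.toStr p.1 ++ " | " ++ PySem.Int.toStr word_count ++ " Words]"]
      let lines := lines ++ [PySem.Str.strip p.2]
      if p.1 < (chunks.length : Int) then lines ++ ["", String.ofList pvSepL, ""] else lines)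
      = fun lines p => lines ++ pvG chunks.length p := by
    funext lines p
    by_cases hc : p.1 < (chunks.length : Int) <;>
      simp [pvG, pvHdrStr, hc, List.append_assoc]
  rw [hf, PySem.List.foldl_append_eq_flatMap]
  simp

lemma pvG_toList (n : Nat) (p : Int × String) :
    (pvG n p).map String.toList
      = [pvHdr p, (PySem.Str.strip p.2).toList] ++ (if p.1 < (n : Int) then [[], pvSepL, []] else []) := by
  by_cases hc : p.1 < (n : Int) <;> simp [pvG, pvHdr, hc]

-- join over a concatenation of two nonempty part-lists splits around one glue
lemma pv_join_append (g : List Char) (X Y : List (List Char)) (hX : X ≠ []) (hY : Y ≠ []) :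
    PySem.Chars.join g (X ++ Y) = PySem.Chars.join g X ++ g ++ PySem.Chars.join g Y := by
  induction X with
  | nil => exact absurd rfl hX
  | cons x X' ih =>
    cases X' with
    | nil =>
      obtain ⟨y, Y', rfl⟩ := List.exists_cons_of_ne_nil hY
      simp [PySem.Chars.join_cons_cons, PySem.Chars.join_singleton]
    | cons x2 X'' =>
      have ih' := ih (by simp)
      simp only [List.cons_append] at ih' ⊢
      rw [PySem.Chars.join_cons_cons, PySem.Chars.join_cons_cons, ih']
      simp [List.append_assoc]

-- the divide-and-conquer recursion computes the glue-join of the blocks on [lo, hi)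
lemma pvFmt_toList (chunks : List String) :
    ∀ (k lo hi : Nat), hi - lo = k → lo < hi →
      (pvFmt chunks lo hi).toList
        = PySem.Chars.join pvGlueL ((List.range' lo (hi - lo)).map (pvBlockAt chunks)) := by
  intro k
  induction k using Nat.strong_induction_on with
  | _ k ih =>
    intro lo hi hk hlt
    unfold pvFmt
    by_cases h1 : hi - lo = 1
    · rw [if_pos h1, h1]
      simp [pvBlockAt, pvHdr, pvHdrStr, PySem.Chars.join_singleton, List.range']
    · have h2 : lo + 2 ≤ hi := by omega
      rw [if_neg h1, if_neg (by omega)]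
      have hmid1 : lo < (lo + hi) / 2 := by omega
      have hmid2 : (lo + hi) / 2 < hi := by omega
      have e1 := ih ((lo + hi) / 2 - lo) (by omega) lo ((lo + hi) / 2) rfl hmid1
      have e2 := ih (hi - (lo + hi) / 2) (by omega) ((lo + hi) / 2) hi rfl hmid2
      have hr : List.range' lo ((lo + hi) / 2 - lo) ++ List.range' ((lo + hi) / 2) (hi - (lo + hi) / 2)
          = List.range' lo (hi - lo) := by
        have := @List.range'_append lo ((lo + hi) / 2 - lo) (hi - (lo + hi) / 2) 1
        rw [show lo + 1 * ((lo + hi) / 2 - lo) = (lo + hi) / 2 by omega] at this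
        rw [this, show (lo + hi) / 2 - lo + (hi - (lo + hi) / 2) = hi - lo by omega]
      rw [← hr, List.map_append,
        pv_join_append _ _ _ (by simp; omega) (by simp; omega), ← e1, ← e2]
      simp [pvGlueL, pvSepL, List.append_assoc]

-- the enumerate-based block list is the index-based one
lemma pv_enum_blocks (chs : List String) :
    (PySem.List.enumerate chs (1 : Int)).map (fun p => pvHdr p ++ '\n' :: (PySem.Str.strip p.2).toList)
      = (List.range' 0 chs.length).map (pvBlockAt chs) := by
  apply List.ext_getElem
  · simp [PySem.List.length_enumerate]
  · intro k h1 h2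
    simp only [List.getElem_map, PySem.List.getElem_enumerate, List.getElem_range']
    have hk : k < chs.length := by simpa [PySem.List.length_enumerate] using h1
    simp [pvBlockAt, PySem.List.pyGetD_natCast, List.getD, List.getElem?_eq_getElem hk,
      show ((1 : Int) + k) = ((0 + 1 * k : Nat) : Int) + 1 by push_cast; omega]

-- ===== VERDICT =====
theorem format_chunks_for_export_py_spec : Claim_equal_format_chunks_for_export_py := by
  intro chunks _
  unfold Spec_format_chunks_for_export_py format_chunks_for_export_py format_chunks_for_export_py_alt
  by_cases hnil : chunks = []
  · simp [hnil]
  · simp only [if_neg hnil]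
    rw [show String.ofList (List.replicate 60 '-') = String.ofList pvSepL from rfl]
    rw [pv_foldl_eq]
    apply congrArg PySem.Str.strip
    apply String.ext
    rw [PySem.Str.toList_join, List.map_flatMap]
    have key := pv_key chunks 1 chunks.length (by omega) hnil
    simp only [Nat.cast_one] at key
    rw [show ("\n" : String).toList = ['\n'] from rfl]
    simp only [pvG_toList]
    rw [key, pv_enum_blocks,
      pvFmt_toList chunks (chunks.length - 0) 0 chunks.length rfl
        (by cases chunks with | nil => exact absurd rfl hnil | cons a b => simp)]
    simp
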